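-- pv_equiv track=rewrite | github.com/InfornoFire/DF-Metadata-Customizer | df_metadata_customizer/rule_manager.py | group_rules_by_logic
-- ===== SOURCE A (Python) =====
-- def group_rules_by_logic(rules: list[dict[str, str]]) -> list[list[dict]]:
--     """Group rules into logical blocks based on AND/OR operators."""
--     if not rules:
--         return []
--
--     blocks = []
--     current_block = []
--
--     for i, rule in enumerate(rules):
--         if i == 0:
--             current_block.append(rule)
--             continue
--         logic = rule.get("logic", "AND")
--         if logic == "AND":
--             current_block.append(rule)
--         else:
--             if current_block:
--                 blocks.append(current_block)
--             current_block = [rule]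
--     if current_block:
--         blocks.append(current_block)
--     return blocks
-- ===== SOURCE B (Python) =====
-- def group_rules_by_logic(rules: list[dict[str, str]]) -> list[list[dict]]:
--     """Group rules into logical blocks based on AND/OR operators."""
--     n = len(rules)
--     out = []
--     i = 0
--     while i < n:
--         j = i + 1
--         while j < n and rules[j].get("logic", "AND") == "AND":
--             j += 1
--         out.append(rules[i:j])
--         i = j
--     return out
-- ===== Notes on version B (the rewrite author's own statement) =====
-- stated objective: alternative
-- what changed: Replaces the enumerate/accumulate-and-flush loop with a two-pointer index scan: for each block start i it advances j past the following AND-rules and emits the slice rules[i:j].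
import Mathlib
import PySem

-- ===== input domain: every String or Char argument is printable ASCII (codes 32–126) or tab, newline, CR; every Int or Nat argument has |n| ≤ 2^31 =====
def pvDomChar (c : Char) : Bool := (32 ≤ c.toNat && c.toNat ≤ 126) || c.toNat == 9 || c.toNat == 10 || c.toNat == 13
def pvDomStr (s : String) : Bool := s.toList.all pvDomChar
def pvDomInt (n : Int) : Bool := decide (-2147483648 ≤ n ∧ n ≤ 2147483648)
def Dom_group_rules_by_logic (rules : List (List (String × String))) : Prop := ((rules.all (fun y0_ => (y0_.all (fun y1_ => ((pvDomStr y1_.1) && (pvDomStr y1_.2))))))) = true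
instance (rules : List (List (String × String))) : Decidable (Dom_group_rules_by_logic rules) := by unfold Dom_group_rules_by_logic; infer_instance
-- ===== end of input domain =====

-- ===== PORT A =====
-- Port of A (b in Source B is an index-scan re-implementation; header: B replaces the
-- accumulate-and-flush loop with a two-pointer index scan, objective: alternative).
-- rule.get("logic", "AND") — first match in the association list
def pvGetLogic (r : List (String × String)) : String :=
  (PySem.Dict.mk r).getD "logic" "AND"

-- the loop body of A, state = (blocks, current_block), iterating over enumerate(rules)
def pvStepA (st : List (List (List (String × String))) × List (List (String × String)))
    (ir : Int × List (String × String)) :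
    List (List (List (String × String))) × List (List (String × String)) :=
  if ir.1 = 0 then (st.1, st.2 ++ [ir.2])
  else
    let logic := pvGetLogic ir.2
    if logic = "AND" then (st.1, st.2 ++ [ir.2])
    else if st.2 ≠ [] then (st.1 ++ [st.2], [ir.2]) else (st.1, [ir.2])

def group_rules_by_logic (rules : List (List (String × String))) : List (List (List (String × String))) :=
  if rules = [] then []
  else
    let st := (PySem.List.enumerate rules).foldl pvStepA ([], [])
    if st.2 ≠ [] then st.1 ++ [st.2] else st.1

-- ===== PORT B =====
-- inner while loop of B: advance j while j < n and rules[j] is an AND-rule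
-- (fuel = a bound on the remaining iterations, only to make the loop structural; rules.length always suffices)
def pvScanGo (rules : List (List (String × String))) : Nat → Nat → Nat
  | 0, j => j
  | fuel + 1, j =>
    if h : j < rules.length then
      if pvGetLogic rules[j] = "AND" then pvScanGo rules fuel (j + 1) else j
    else j

def pvScanB (rules : List (List (String × String))) (j : Nat) : Nat :=
  pvScanGo rules rules.length j

-- outer while loop of B (same fuel bound)
def pvLoopGo (rules : List (List (String × String))) : Nat → Nat → List (List (List (String × String)))
  | 0, _ => []
  | fuel + 1, i =>
    if i < rules.length then
      PySem.List.slice rules (some (i : Int)) (some ((pvScanB rules (i + 1) : Nat) : Int)) ::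
        pvLoopGo rules fuel (pvScanB rules (i + 1))
    else []

def group_rules_by_logic_alt (rules : List (List (String × String))) : List (List (List (String × String))) :=
  pvLoopGo rules rules.length 0

-- ===== PRECONDITION & SPEC =====
def Spec_group_rules_by_logic (rules : List (List (String × String))) (out : List (List (List (String × String)))) : Prop := out = group_rules_by_logic_alt rules
instance (rules : List (List (String × String))) (out : List (List (List (String × String)))) : Decidable (Spec_group_rules_by_logic rules out) := by unfold Spec_group_rules_by_logic; infer_instance

-- ===== CLAIM (what is proved, stated in full; the proofs are below) =====
def Claim_equal_group_rules_by_logic : Prop := ∀ (rules : List (List (String × String))), Dom_group_rules_by_logic rules → Spec_group_rules_by_logic rules (group_rules_by_logic rules)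

-- ===== LEMMAS AND PROOFS =====

-- Bool predicate "this rule continues the current block"
def pvIsAnd (r : List (String × String)) : Bool := pvGetLogic r == "AND"

-- reference form of A's loop: current block `cur` (nonempty), remaining rules
def pvGRef (cur : List (List (String × String))) (rest : List (List (String × String))) :
    List (List (List (String × String))) :=
  match rest with
  | [] => [cur]
  | r :: rs => if pvGetLogic r = "AND" then pvGRef (cur ++ [r]) rs else cur :: pvGRef [r] rs

-- reference form of B's loop: span off the AND-run after each block head
def pvGRef' (xs : List (List (String × String))) : List (List (List (String × String))) :=
  match xs with
  | [] => []
  | r :: rest => (r :: rest.takeWhile pvIsAnd) :: pvGRef' (rest.dropWhile pvIsAnd)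
termination_by xs.length
decreasing_by simpa using Nat.lt_succ_of_le (List.length_dropWhile_le pvIsAnd rest)

theorem pvFoldA_eq (rest : List (List (String × String)))
    (blocks : List (List (List (String × String)))) (cur : List (List (String × String))) (k : Int)
    (hk : 1 ≤ k) (hcur : cur ≠ []) :
    (if ((PySem.List.enumerate rest k).foldl pvStepA (blocks, cur)).2 ≠ [] then
        ((PySem.List.enumerate rest k).foldl pvStepA (blocks, cur)).1 ++
          [((PySem.List.enumerate rest k).foldl pvStepA (blocks, cur)).2]
      else ((PySem.List.enumerate rest k).foldl pvStepA (blocks, cur)).1)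
      = blocks ++ pvGRef cur rest := by
  induction rest generalizing blocks cur k with
  | nil => simp [PySem.List.enumerate, pvGRef, hcur]
  | cons r rs ih =>
    rw [PySem.List.enumerate_cons]
    simp only [List.foldl_cons]
    by_cases hAnd : pvGetLogic r = "AND"
    · have hstep : pvStepA (blocks, cur) (k, r) = (blocks, cur ++ [r]) := by
        simp only [pvStepA]
        rw [if_neg (by omega : ¬ (k = 0))]
        simp [hAnd]
      rw [hstep, ih blocks (cur ++ [r]) (k + 1) (by omega) (by simp)]
      simp [pvGRef, hAnd]
    · have hstep : pvStepA (blocks, cur) (k, r) = (blocks ++ [cur], [r]) := by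
        simp only [pvStepA]
        rw [if_neg (by omega : ¬ (k = 0))]
        simp [hAnd, hcur]
      rw [hstep, ih (blocks ++ [cur]) [r] (k + 1) (by omega) (by simp)]
      simp [pvGRef, hAnd]

theorem pvScanGo_ge (rules : List (List (String × String))) (fuel j : Nat) :
    j ≤ pvScanGo rules fuel j := by
  induction fuel generalizing j with
  | zero => simp [pvScanGo]
  | succ fuel ih =>
    rw [pvScanGo]
    split
    · split
      · exact le_trans (Nat.le_succ j) (ih (j + 1))
      · exact le_refl j
    · exact le_refl j

theorem pvScanGo_eq (rules : List (List (String × String))) (fuel j : Nat)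
    (hf : rules.length - j ≤ fuel) :
    pvScanGo rules fuel j = j + ((rules.drop j).takeWhile pvIsAnd).length := by
  induction fuel generalizing j with
  | zero =>
    rw [pvScanGo, List.drop_eq_nil_of_le (by omega : rules.length ≤ j)]
    simp
  | succ fuel ih =>
    rw [pvScanGo]
    by_cases h : j < rules.length
    · rw [List.drop_eq_getElem_cons h]
      by_cases hAnd : pvGetLogic rules[j] = "AND"
      · have hb : pvIsAnd rules[j] = true := by simp [pvIsAnd, hAnd]
        rw [dif_pos h, if_pos hAnd, ih (j + 1) (by omega)]
        rw [List.takeWhile_cons, hb]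
        simp; omega
      · have hb : pvIsAnd rules[j] = false := by simp [pvIsAnd, hAnd]
        rw [List.takeWhile_cons, hb]
        simp [h, hAnd]
    · rw [dif_neg h, List.drop_eq_nil_of_le (by omega : rules.length ≤ j)]
      simp

theorem pvScanB_eq (rules : List (List (String × String))) (j : Nat) :
    pvScanB rules j = j + ((rules.drop j).takeWhile pvIsAnd).length :=
  pvScanGo_eq rules rules.length j (by omega)

theorem pvScanB_ge (rules : List (List (String × String))) (j : Nat) : j ≤ pvScanB rules j :=
  pvScanGo_ge rules rules.length j

theorem pvLoopGo_eq (rules : List (List (String × String))) (fuel i : Nat)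
    (hf : rules.length - i ≤ fuel) :
    pvLoopGo rules fuel i = pvGRef' (rules.drop i) := by
  induction fuel generalizing i with
  | zero =>
    rw [pvLoopGo, List.drop_eq_nil_of_le (by omega : rules.length ≤ i), pvGRef']
  | succ fuel ih =>
    rw [pvLoopGo]
    by_cases h : i < rules.length
    · have hdrop : rules.drop i = rules[i] :: rules.drop (i + 1) := List.drop_eq_getElem_cons h
      have hscan := pvScanB_eq rules (i + 1)
      set t := (rules.drop (i + 1)).takeWhile pvIsAnd with ht
      -- the slice is the block head plus its AND-run
      have hslice : PySem.List.slice rules (some (i : Int)) (some ((pvScanB rules (i + 1) : Nat) : Int))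
          = rules[i] :: t := by
        rw [PySem.List.slice_natCast, hdrop, hscan]
        rw [show i + 1 + t.length - i = t.length + 1 from by omega]
        rw [List.take_succ_cons,
          show (rules.drop (i + 1)).take t.length = t from
            (List.prefix_iff_eq_take.mp (List.takeWhile_prefix pvIsAnd)).symm]
      -- the remaining suffix is everything after the AND-run
      have hrest : rules.drop (pvScanB rules (i + 1)) = (rules.drop (i + 1)).dropWhile pvIsAnd := by
        calc rules.drop (pvScanB rules (i + 1)) = (rules.drop (i + 1)).drop t.length := by
              rw [hscan, List.drop_drop]
          _ = ((rules.drop (i + 1)).takeWhile pvIsAnd ++ (rules.drop (i + 1)).dropWhile pvIsAnd).drop t.length := by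
              rw [List.takeWhile_append_dropWhile]
          _ = (rules.drop (i + 1)).dropWhile pvIsAnd := by
              rw [← ht]; exact List.drop_left
      have hge := pvScanB_ge rules (i + 1)
      rw [if_pos h, ih (pvScanB rules (i + 1)) (by omega), hslice, hrest]
      rw [show pvGRef' (rules.drop i) = (rules[i] :: t) :: pvGRef' ((rules.drop (i+1)).dropWhile pvIsAnd) by
        rw [hdrop]; rw [pvGRef']]
    · rw [if_neg h, List.drop_eq_nil_of_le (by omega : rules.length ≤ i), pvGRef']

theorem pvGRef_eq (rest : List (List (String × String)))
    (cur : List (List (String × String))) :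
    pvGRef cur rest = (cur ++ rest.takeWhile pvIsAnd) :: pvGRef' (rest.dropWhile pvIsAnd) := by
  induction rest generalizing cur with
  | nil => simp [pvGRef, pvGRef']
  | cons r rs ih =>
    by_cases hAnd : pvGetLogic r = "AND"
    · rw [pvGRef, if_pos hAnd, ih]
      simp [pvIsAnd, hAnd]
    · rw [pvGRef, if_neg hAnd, ih ([r])]
      simp only [List.takeWhile_cons, List.dropWhile_cons, pvIsAnd]
      rw [if_neg (by simpa using hAnd), if_neg (by simpa using hAnd)]
      rw [pvGRef']
      simp

-- ===== VERDICT (by name: the statement is the Claim_ definition above) =====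
theorem group_rules_by_logic_spec : Claim_equal_group_rules_by_logic := by
  intro rules _
  unfold Spec_group_rules_by_logic group_rules_by_logic
  match rules with
  | [] => simp [group_rules_by_logic_alt, pvLoopGo]
  | r0 :: rest =>
    rw [if_neg (by simp)]
    rw [PySem.List.enumerate_cons]
    simp only [List.foldl_cons]
    have h0 : pvStepA ([], []) (0, r0) = ([], [r0]) := by simp [pvStepA]
    rw [h0, pvFoldA_eq rest [] [r0] (0 + 1) (by omega) (by simp)]
    rw [pvGRef_eq, show group_rules_by_logic_alt (r0 :: rest) = pvGRef' ((r0 :: rest).drop 0) from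
      pvLoopGo_eq (r0 :: rest) (r0 :: rest).length 0 (by omega)]
    simp only [List.drop_zero]
    rw [pvGRef']
    simp
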